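-- pv_equiv track=rewrite | github.com/mpettersson/PythonReview | questions/list_and_recursion/find_two_sum_max_less_than_t.py | find_two_sum_max_less_than_t_via_bf
-- ===== SOURCE A (Python) =====
-- def find_two_sum_max_less_than_t_via_bf(l, t):
--     if l is not None and t is not None:
--         result = -1
--         for i in range(len(l)):
--             for j in range(i + 1, len(l)):
--                 if l[i] + l[j] < t:
--                     result = max(result, l[i] + l[j])
--         return result
-- ===== SOURCE B (Python) =====
-- def find_two_sum_max_less_than_t_via_bf(l, t):
--     a = sorted(l)
--     best = -1
--     lo, hi = 0, len(a) - 1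
--     while lo < hi:
--         s = a[lo] + a[hi]
--         if s < t:
--             if s > best:
--                 best = s
--             lo += 1
--         else:
--             hi -= 1
--     return best
-- ===== Notes on version B (the rewrite author's own statement) =====
-- stated objective: faster
-- what changed: replaced the O(n^2) scan over all index pairs by sort followed by a two-pointer sweep tracking the best sum below t
import Mathlib
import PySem

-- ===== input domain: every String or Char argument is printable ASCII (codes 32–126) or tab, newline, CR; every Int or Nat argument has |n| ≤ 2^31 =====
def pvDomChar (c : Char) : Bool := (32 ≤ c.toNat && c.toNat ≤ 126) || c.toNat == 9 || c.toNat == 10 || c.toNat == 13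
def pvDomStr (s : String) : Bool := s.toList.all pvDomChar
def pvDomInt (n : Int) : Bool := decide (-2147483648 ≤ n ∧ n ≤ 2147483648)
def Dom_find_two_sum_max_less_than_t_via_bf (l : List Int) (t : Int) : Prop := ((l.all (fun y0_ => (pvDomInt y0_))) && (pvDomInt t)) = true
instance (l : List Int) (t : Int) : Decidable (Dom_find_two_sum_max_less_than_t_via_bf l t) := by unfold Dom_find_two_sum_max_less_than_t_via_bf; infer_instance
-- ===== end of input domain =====

-- B replaces A's scan over all index pairs by sort followed by a two-pointer sweep (objective: faster).

-- ===== PORT A =====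
-- literal port of A's two nested index loops; the guard `l is not None and t is not None` is always true under these types
def find_two_sum_max_less_than_t_via_bf (l : List Int) (t : Int) : Int :=
  (PySem.List.pyRange 0 (l.length : Int) 1).foldl (fun result i =>
    (PySem.List.pyRange (i + 1) (l.length : Int) 1).foldl (fun result j =>
      if PySem.List.pyGetD l i 0 + PySem.List.pyGetD l j 0 < t then
        max result (PySem.List.pyGetD l i 0 + PySem.List.pyGetD l j 0)
      else result) result) (-1)

-- ===== PORT B =====
-- the while-loop of Source B; a[lo] / a[hi] are always in range there (lo < hi < len a), ported with getD
def twoPtr (a : List Int) (t : Int) (lo hi : Nat) (best : Int) : Int :=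
  if lo < hi then
    if a.getD lo 0 + a.getD hi 0 < t then
      twoPtr a t (lo + 1) hi
        (if a.getD lo 0 + a.getD hi 0 > best then a.getD lo 0 + a.getD hi 0 else best)
    else
      twoPtr a t lo (hi - 1) best
  else best
termination_by hi - lo
decreasing_by all_goals omega

def find_two_sum_max_less_than_t_via_bf_alt (l : List Int) (t : Int) : Int :=
  let a := PySem.List.sorted l (fun x => x) false
  twoPtr a t 0 (a.length - 1) (-1)

-- ===== PRECONDITION & SPEC =====
def Spec_find_two_sum_max_less_than_t_via_bf (l : List Int) (t : Int) (out : Int) : Prop := out = find_two_sum_max_less_than_t_via_bf_alt l t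
instance (l : List Int) (t : Int) (out : Int) : Decidable (Spec_find_two_sum_max_less_than_t_via_bf l t out) := by unfold Spec_find_two_sum_max_less_than_t_via_bf; infer_instance

-- ===== CLAIM (what is proved, stated in full; the proofs are below) =====
def Claim_equal_find_two_sum_max_less_than_t_via_bf : Prop := ∀ (l : List Int) (t : Int), Dom_find_two_sum_max_less_than_t_via_bf l t → Spec_find_two_sum_max_less_than_t_via_bf l t (find_two_sum_max_less_than_t_via_bf l t)

-- ===== LEMMAS AND PROOFS =====

-- the update both programs perform on one candidate sum s
def pvStep (t r s : Int) : Int := if s < t then max r s else r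

-- all pair sums l[i] + l[j], i < j, in A's visiting order
def pairSums : List Int → List Int
  | [] => []
  | x :: xs => xs.map (x + ·) ++ pairSums xs

-- the segment a[lo..hi] (inclusive) the two-pointer loop still works on
def seg (a : List Int) (lo hi : Nat) : List Int := (a.drop lo).take (hi + 1 - lo)

-- ---- A is the fold of pvStep over pairSums l ----

lemma foldl_shift (f : Int → Int → Int) (a b : Int) (init : Int) :
    (PySem.List.pyRange (a + 1) (b + 1) 1).foldl f init
      = (PySem.List.pyRange a b 1).foldl (fun r i => f r (i + 1)) init := by
  rw [PySem.List.pyRange_one, PySem.List.pyRange_one, List.foldl_map, List.foldl_map]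
  rw [show b + 1 - (a + 1) = b - a by ring]
  congr 1
  funext r k
  congr 1
  ring

lemma foldl_shift' (f : Int → Int → Int) (b : Int) (init : Int) :
    (PySem.List.pyRange 1 (b + 1) 1).foldl f init
      = (PySem.List.pyRange 0 b 1).foldl (fun r i => f r (i + 1)) init := by
  simpa using foldl_shift f 0 b init

lemma pyGetD_cons_succ (x : Int) (xs : List Int) (i : Int) (h : 0 ≤ i) :
    PySem.List.pyGetD (x :: xs) (i + 1) 0 = PySem.List.pyGetD xs i 0 := by
  rw [show i + 1 = ((i.toNat + 1 : Nat) : Int) by omega, PySem.List.pyGetD_natCast,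
    show i = ((i.toNat : Nat) : Int) by omega, PySem.List.pyGetD_natCast]
  simp only [List.getD, Int.toNat_natCast, List.getElem?_cons_succ]

lemma A_eq_fold (l : List Int) (t : Int) : ∀ init,
    (PySem.List.pyRange 0 (l.length : Int) 1).foldl (fun result i =>
      (PySem.List.pyRange (i + 1) (l.length : Int) 1).foldl (fun result j =>
        pvStep t result (PySem.List.pyGetD l i 0 + PySem.List.pyGetD l j 0)) result) init
      = (pairSums l).foldl (pvStep t) init := by
  induction l with
  | nil => intro init; simp [pairSums, PySem.List.pyRange_one_eq_nil]
  | cons x xs ih =>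
    intro init
    have hn : (0 : Int) < ((x :: xs).length : Int) := by simp
    rw [PySem.List.pyRange_one_cons hn, List.foldl_cons]
    have h0 := PySem.List.foldl_pyRange_pyGetD (x :: xs) 0
      (fun acc v => pvStep t acc (PySem.List.pyGetD (x :: xs) 0 0 + v)) init (a := 1) (by omega)
    rw [PySem.List.len_eq] at h0
    simp only [zero_add]
    rw [h0]
    simp only [PySem.List.pyGetD_zero_cons, Int.toNat_one, List.drop_one, List.tail_cons]
    rw [← List.foldl_map (f := (x + ·)) (g := pvStep t)]
    rw [show ((x :: xs).length : Int) = (xs.length : Int) + 1 by simp, foldl_shift']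
    rw [PySem.List.foldl_congr_mem (PySem.List.pyRange 0 (xs.length : Int) 1) _
      (fun r i => (PySem.List.pyRange (i + 1) (xs.length : Int) 1).foldl (fun result j =>
        pvStep t result (PySem.List.pyGetD xs i 0 + PySem.List.pyGetD xs j 0)) r)
      _ ?_]
    · rw [ih]
      simp [pairSums, List.foldl_append]
    · intro r i hi
      have hmem := (PySem.List.mem_pyRange_one).1 hi
      simp only
      rw [pyGetD_cons_succ x xs i hmem.1]
      rw [show (xs.length : Int) + 1 = ((xs.length : Int)) + 1 from rfl, foldl_shift]
      exact PySem.List.foldl_congr_mem _ _ _ _ (fun r' j hj => by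
        have hj' := (PySem.List.mem_pyRange_one).1 hj
        rw [pyGetD_cons_succ x xs j (by omega)])

lemma portA_eq (l : List Int) (t : Int) :
    find_two_sum_max_less_than_t_via_bf l t = (pairSums l).foldl (pvStep t) (-1) :=
  A_eq_fold l t (-1)

-- ---- the fold is invariant under permutation of the pair sums ----

lemma pvStep_rightComm (t : Int) : ∀ r a b, pvStep t (pvStep t r a) b = pvStep t (pvStep t r b) a := by
  intro r a b
  simp only [pvStep, max_def]
  split_ifs <;> omega

lemma foldl_pvStep_perm {s s' : List Int} (t init : Int) (h : s.Perm s') :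
    s.foldl (pvStep t) init = s'.foldl (pvStep t) init :=
  h.foldl_eq (rcomm := ⟨fun r a b => pvStep_rightComm t r a b⟩) init

lemma pairSums_perm {l l' : List Int} (h : l.Perm l') : (pairSums l).Perm (pairSums l') := by
  induction h with
  | nil => simp [pairSums]
  | cons x h ih => exact (h.map _).append ih
  | swap x y l =>
    simp only [pairSums, List.map_cons]
    rw [show y + x = x + y from add_comm y x, List.perm_iff_count]
    intro c
    simp only [List.count_append, List.count_cons]
    omega
  | trans h1 h2 ih1 ih2 => exact ih1.trans ih2

lemma pairSums_snoc (ys : List Int) (z : Int) :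
    (pairSums (ys ++ [z])).Perm (pairSums ys ++ ys.map (· + z)) := by
  induction ys with
  | nil => simp [pairSums]
  | cons x ys ih =>
    simp only [List.cons_append, pairSums, List.map_append, List.map_cons, List.map_nil]
    refine (ih.append_left _).trans ?_
    rw [List.perm_iff_count]
    intro c
    simp only [List.count_append, List.count_cons, List.count_nil]
    omega

-- ---- the two-pointer loop on a sorted list ----

lemma seg_cons (a : List Int) (lo hi : Nat) (hlo : lo < a.length) (hlh : lo ≤ hi) :
    seg a lo hi = a[lo] :: seg a (lo + 1) hi := by
  unfold seg
  rw [List.drop_eq_getElem_cons hlo, show hi + 1 - lo = (hi + 1 - (lo + 1)) + 1 by omega,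
    List.take_succ_cons]

lemma seg_snoc (a : List Int) (lo hi : Nat) (hhi : hi < a.length) (hpos : 0 < hi) (hlh : lo ≤ hi) :
    seg a lo hi = seg a lo (hi - 1) ++ [a[hi]] := by
  unfold seg
  rw [show hi + 1 - lo = (hi - lo) + 1 by omega, List.take_add_one,
    show hi - 1 + 1 - lo = hi - lo by omega]
  congr 1
  rw [List.getElem?_drop, show lo + (hi - lo) = hi by omega, List.getElem?_eq_getElem hhi]
  rfl

lemma seg_sublist (a : List Int) (lo hi : Nat) : (seg a lo hi).Sublist a :=
  (List.take_sublist _ _).trans (List.drop_sublist _ _)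

lemma pairSums_short (l : List Int) (h : l.length ≤ 1) : pairSums l = [] := by
  match l, h with
  | [], _ => rfl
  | [x], _ => rfl

-- all mapped sums below t on a sorted tail: the fold is max with the largest sum
lemma fold_take_all (t x best : Int) (rest : List Int) (hs : rest.Pairwise (· ≤ ·))
    (hne : rest ≠ []) (hlt : x + rest.getLast hne < t) :
    (rest.map (x + ·)).foldl (pvStep t) best = max best (x + rest.getLast hne) := by
  induction rest generalizing best with
  | nil => exact absurd rfl hne
  | cons y ys ih =>
    cases ys with
    | nil => simp [pvStep, List.getLast] at hlt ⊢; simp [hlt]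
    | cons z zs =>
      have hlast : (y :: z :: zs).getLast (by simp) = (z :: zs).getLast (by simp) := by
        simp [List.getLast]
      rw [hlast] at hlt
      have hyle : y ≤ (z :: zs).getLast (by simp) :=
        (List.pairwise_cons.1 hs).1 _ (List.getLast_mem _)
      rw [List.map_cons, List.foldl_cons, hlast,
        show pvStep t best (x + y) = max best (x + y) by simp [pvStep]; intro h; omega,
        ih (List.Pairwise.sublist (by simp) hs) (by simp) hlt (best := max best (x + y))]
      have : x + y ≤ x + (z :: zs).getLast (by simp) := by omega
      omega

-- every sum is at least t: the fold does nothing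
lemma fold_drop_all (t best : Int) (ys : List Int) (h : ∀ y ∈ ys, t ≤ y) :
    ys.foldl (pvStep t) best = best := by
  induction ys generalizing best with
  | nil => rfl
  | cons y ys ih =>
    have hy : t ≤ y := h y List.mem_cons_self
    rw [List.foldl_cons, show pvStep t best y = best from by unfold pvStep; rw [if_neg (by omega)]]
    exact ih best (fun z hz => h z (List.mem_cons_of_mem _ hz))

lemma drop_head_le (a : List Int) (hs : a.Pairwise (· ≤ ·)) (lo : Nat) (hlo : lo < a.length) :
    ∀ y ∈ a.drop lo, a[lo] ≤ y := by
  have hp : (a.drop lo).Pairwise (· ≤ ·) := List.Pairwise.sublist (List.drop_sublist _ _) hs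
  rw [List.drop_eq_getElem_cons hlo] at hp ⊢
  intro y hy
  rcases List.mem_cons.1 hy with h | h
  · omega
  · exact (List.pairwise_cons.1 hp).1 y h

lemma twoPtr_eq (a : List Int) (t : Int) (hs : a.Pairwise (· ≤ ·)) :
    ∀ (n lo hi : Nat) (best : Int), hi - lo = n → hi < a.length →
      twoPtr a t lo hi best = (pairSums (seg a lo hi)).foldl (pvStep t) best := by
  intro n
  induction n with
  | zero =>
    intro lo hi best hn hlen
    rw [twoPtr, if_neg (by omega),
      pairSums_short _ (by unfold seg; simp; omega)]
    rfl
  | succ n ih =>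
    intro lo hi best hn hlen
    have hlh : lo < hi := by omega
    have hlo : lo < a.length := by omega
    have hgetlo : a.getD lo 0 = a[lo] := List.getD_eq_getElem _ _ hlo
    have hgethi : a.getD hi 0 = a[hi] := List.getD_eq_getElem _ _ hlen
    rw [twoPtr, if_pos hlh]
    by_cases hc : a.getD lo 0 + a.getD hi 0 < t
    · rw [if_pos hc, ih (lo + 1) hi _ (by omega) hlen]
      have hrest_ne : seg a (lo + 1) hi ≠ [] := by
        unfold seg
        simp only [ne_eq, List.take_eq_nil_iff, List.drop_eq_nil_iff]
        push Not
        constructor <;> omega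
      have hlast : (seg a (lo + 1) hi).getLast hrest_ne = a[hi] := by
        have := seg_snoc a (lo + 1) hi hlen (by omega) (by omega)
        rw [List.getLast_congr _ _ this]
        exact List.getLast_concat ..
      rw [seg_cons a lo hi hlo hlh.le]
      simp only [pairSums, List.foldl_append]
      rw [fold_take_all t a[lo] best _ (List.Pairwise.sublist (seg_sublist a _ _) hs) hrest_ne
        (by rw [hlast]; omega)]
      rw [hlast]
      congr 1
      rw [hgetlo, hgethi]
      simp [max_def]
      omega
    · rw [if_neg hc, ih lo (hi - 1) best (by omega) (by omega)]
      rw [seg_snoc a lo hi hlen (by omega) hlh.le,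
        foldl_pvStep_perm t best (pairSums_snoc _ _), List.foldl_append]
      rw [fold_drop_all t _ ((seg a lo (hi - 1)).map (· + a[hi])) ?_]
      intro w hw
      rcases List.mem_map.1 hw with ⟨y, hy, rfl⟩
      have h1 : a[lo] ≤ y :=
        drop_head_le a hs lo hlo y (List.mem_of_mem_take hy)
      rw [hgetlo, hgethi] at hc
      omega

lemma ports_agree (l : List Int) (t : Int) :
    find_two_sum_max_less_than_t_via_bf l t = find_two_sum_max_less_than_t_via_bf_alt l t := by
  rw [portA_eq]
  show _ = twoPtr (PySem.List.sorted l (fun x => x) false) t 0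
    ((PySem.List.sorted l (fun x => x) false).length - 1) (-1)
  set a := PySem.List.sorted l (fun x => x) false with ha
  have hperm : a.Perm l := PySem.List.sorted_perm l (fun x => x) false
  have hs : a.Pairwise (· ≤ ·) := by
    simpa using PySem.List.sorted_pairwise l (fun x => x)
  by_cases hnil : a = []
  · have hl : l = [] := (hnil ▸ hperm).symm.eq_nil
    subst hl
    rw [hnil]
    simp [pairSums, twoPtr]
  · have hl0 : 0 < a.length := List.length_pos_iff.2 hnil
    rw [twoPtr_eq a t hs (a.length - 1 - 0) 0 (a.length - 1) (-1) rfl (by omega)]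
    have hseg : seg a 0 (a.length - 1) = a := by
      unfold seg
      rw [List.drop_zero, show a.length - 1 + 1 - 0 = a.length by omega, List.take_length]
    rw [hseg]
    exact foldl_pvStep_perm t (-1) (pairSums_perm hperm.symm)

-- ===== VERDICT (by name: the statement is the Claim_ definition above) =====
theorem find_two_sum_max_less_than_t_via_bf_spec : Claim_equal_find_two_sum_max_less_than_t_via_bf := by
  intro l t _
  unfold Spec_find_two_sum_max_less_than_t_via_bf
  exact ports_agree l t
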